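-- pv_equiv track=rewrite | github.com/vuski/qbtiles | tests/test_roundtrip.py | bitmask_to_leaf_quadkeys
-- ===== SOURCE A (Python) =====
-- def bitmask_to_leaf_quadkeys(bm_raw):
--     """Parse raw bitmask nibbles (no 4B prefix) → list of leaf quadkey int64s."""
--     nibbles = []
--     for b in bm_raw:
--         nibbles.append(b >> 4)
--         nibbles.append(b & 0x0F)
--     if nibbles and nibbles[-1] == 0:
--         nibbles.pop()
--
--     quadkeys_all = [3]  # root
--     queue = [3]
--     idx = 0
--     while idx < len(nibbles):
--         next_queue = []
--         for parent in queue: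
--             if idx >= len(nibbles):
--                 break
--             mask = nibbles[idx]
--             for i in range(4):
--                 if mask & (1 << (3 - i)):
--                     child = (parent << 2) | i
--                     quadkeys_all.append(child)
--                     next_queue.append(child)
--             idx += 1
--         queue = next_queue
--
--     total_children = sum(bin(n).count('1') for n in nibbles)
--     leaf_count = total_children - len(nibbles) + 1
--     return quadkeys_all[-leaf_count:]
-- ===== SOURCE B (Python) =====
-- def bitmask_to_leaf_quadkeys(bm_raw):
--     """Single flat pass: the output list itself is the BFS worklist; the idx-th
--     discovered node is exactly the parent that consumes nibble idx, so no level
--     queues are needed."""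
--     nibbles = []
--     for b in bm_raw:
--         nibbles += [b >> 4, b & 0x0F]
--     if nibbles and nibbles[-1] == 0:
--         nibbles.pop()
--
--     nodes = [3]  # root
--     for idx, mask in enumerate(nibbles):
--         parent = nodes[idx]
--         for i in range(4):
--             if mask & (8 >> i):
--                 nodes.append((parent << 2) | i)
--     return nodes[-(sum(bin(m).count('1') for m in nibbles) - len(nibbles) + 1):]
-- ===== Notes on version B (the rewrite author's own statement) =====
-- stated objective: simpler
-- what changed: Replaced the level-by-level BFS (explicit queue, next_queue, nested while/for with break) by a single flat pass that uses the output list itself as the worklist: the idx-th discovered node is the parent consuming nibble idx; the final leaf-count slice is kept.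
import Mathlib
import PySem

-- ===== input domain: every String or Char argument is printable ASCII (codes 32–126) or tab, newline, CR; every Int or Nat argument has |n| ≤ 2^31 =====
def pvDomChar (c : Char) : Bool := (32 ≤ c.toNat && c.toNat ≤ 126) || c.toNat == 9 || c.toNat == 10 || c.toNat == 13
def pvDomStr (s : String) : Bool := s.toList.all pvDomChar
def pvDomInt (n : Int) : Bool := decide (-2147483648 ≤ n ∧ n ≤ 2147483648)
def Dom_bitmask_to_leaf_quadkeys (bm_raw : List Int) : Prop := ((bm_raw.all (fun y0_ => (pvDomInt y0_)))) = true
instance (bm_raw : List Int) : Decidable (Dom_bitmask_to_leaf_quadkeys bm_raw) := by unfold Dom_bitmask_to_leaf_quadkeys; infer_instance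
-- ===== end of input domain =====

-- B replaces A's level-by-level queue BFS by one flat pass that uses the output list itself as
-- the worklist (simpler: no queue/next_queue/level loop); same leaf-count slice at the end.

-- ===== PORT A =====
-- inner 'for i in range(4)' of A: appends each set child to quadkeys_all AND next_queue
def pvBitsA (mask parent : Int) (s : List Int × List Int) : List Int × List Int :=
  (List.range 4).foldl (fun (s : List Int × List Int) (i : Nat) =>
    if PySem.Int.band mask ((1 : Int) <<< (3 - i)) ≠ 0 then
      (s.1 ++ [PySem.Int.bor (parent <<< 2) (i : Int)],
       s.2 ++ [PySem.Int.bor (parent <<< 2) (i : Int)])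
    else s) s

-- 'for parent in queue: if idx >= len(nibbles): break; …' — state (idx, quadkeys_all, next_queue)
def pvInnerA (nibbles : List Int) : List Int → Nat → List Int → List Int → Nat × List Int × List Int
  | [], idx, all, nq => (idx, all, nq)
  | parent :: rest, idx, all, nq =>
    if nibbles.length ≤ idx then (idx, all, nq)
    else
      let mask := PySem.List.pyGetD nibbles (idx : Int) 0   -- nibbles[idx], in range here
      let s := pvBitsA mask parent (all, nq)
      pvInnerA nibbles rest (idx + 1) s.1 s.2

-- 'while idx < len(nibbles)': fuel recursion; len(nibbles)+1 iterations suffice whenever the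
-- Python loop terminates (each round with a nonempty queue consumes ≥ 1 nibble); on inputs
-- where the Python while-loop never terminates (excluded by Pre_) the fuel runs out.
def pvOuterA (nibbles : List Int) : Nat → List Int → Nat → List Int → List Int
  | 0, _queue, _idx, all => all
  | fuel + 1, queue, idx, all =>
    if idx < nibbles.length then
      let r := pvInnerA nibbles queue idx all []
      pvOuterA nibbles fuel r.2.2 r.1 r.2.1
    else all

def bitmask_to_leaf_quadkeys (bm_raw : List Int) : List Int :=
  let nibbles0 := bm_raw.foldl (fun (acc : List Int) (b : Int) => acc ++ [b >>> (4 : Nat), PySem.Int.band b 15]) []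
  -- 'if nibbles and nibbles[-1] == 0: nibbles.pop()' (getLast? = some 0 implies nonempty)
  let nibbles := if nibbles0.getLast? = some 0 then nibbles0.dropLast else nibbles0
  let all := pvOuterA nibbles (nibbles.length + 1) [3] 0 [3]
  -- sum(bin(n).count('1') for n in nibbles): bitCount reads |n|, exactly like bin()
  let total_children : Int := (nibbles.map (fun n => (PySem.Int.bitCount n : Int))).sum
  let leaf_count : Int := total_children - nibbles.length + 1
  PySem.List.slice all (some (-leaf_count)) none

-- ===== PORT B =====
-- body of B's single flat loop: look up the parent at index idx, append its set children
def pvStepB (nodes : List Int) (im : Int × Int) : List Int :=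
  let parent := PySem.List.pyGetD nodes im.1 0   -- nodes[idx]; in range under Pre_
  (List.range 4).foldl (fun (ns : List Int) (i : Nat) =>
    if PySem.Int.band im.2 ((8 : Int) >>> i) ≠ 0 then
      ns ++ [PySem.Int.bor (parent <<< 2) (i : Int)]
    else ns) nodes

def bitmask_to_leaf_quadkeys_alt (bm_raw : List Int) : List Int :=
  let nibbles0 := bm_raw.foldl (fun (acc : List Int) (b : Int) => acc ++ [b >>> (4 : Nat), PySem.Int.band b 15]) []
  let nibbles := if nibbles0.getLast? = some 0 then nibbles0.dropLast else nibbles0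
  let nodes := (PySem.List.enumerate nibbles 0).foldl pvStepB [3]
  PySem.List.slice nodes
    (some (-((nibbles.map (fun m => (PySem.Int.bitCount m : Int))).sum - nibbles.length + 1))) none

-- ===== PRECONDITION & SPEC =====
-- The bitmask encodes two nibbles per byte (high first); a trailing zero nibble is dropped.
-- pvNibLen bm = number of nibbles, pvNib bm k = the k-th nibble, both written arithmetically
-- (Python's b >> 4 is floor division by 16 and b & 15 is b mod 16, for every int b).
def pvNibLen (bm_raw : List Int) : Nat :=
  if (bm_raw.getLast?.getD 1) % 16 = 0 then 2 * bm_raw.length - 1 else 2 * bm_raw.length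

def pvNib (bm_raw : List Int) (k : Nat) : Int :=
  if k % 2 = 0 then bm_raw.getD (k / 2) 0 / 16 else bm_raw.getD (k / 2) 0 % 16

-- number of set bits among the low 4 bits of m (the children a nibble hangs below its parent)
def pvCnt (m : Int) : Nat := ([1, 2, 4, 8] : List Int).countP (fun d => m / d % 2 = 1)

-- Pre_ = the bitmask encodes a complete tree: before nibble k is consumed, more than k nodes
-- have been discovered.  Exactly on these inputs A's while-loop terminates (otherwise the
-- queue starves with nibbles remaining and A loops forever, while B raises IndexError).
def Pre_bitmask_to_leaf_quadkeys (bm_raw : List Int) : Prop :=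
  ∀ k, k < pvNibLen bm_raw → k < 1 + ∑ j ∈ Finset.range k, pvCnt (pvNib bm_raw j)
instance (bm_raw : List Int) : Decidable (Pre_bitmask_to_leaf_quadkeys bm_raw) := by
  unfold Pre_bitmask_to_leaf_quadkeys; infer_instance

def pvWitness_bitmask_to_leaf_quadkeys : List Int := [128]

def Spec_bitmask_to_leaf_quadkeys (bm_raw : List Int) (out : List Int) : Prop :=
  out = bitmask_to_leaf_quadkeys_alt bm_raw
instance (bm_raw : List Int) (out : List Int) : Decidable (Spec_bitmask_to_leaf_quadkeys bm_raw out) := by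
  unfold Spec_bitmask_to_leaf_quadkeys; infer_instance

-- ===== CLAIM (what is proved, stated in full; the proofs are below) =====
def Claim_equal_bitmask_to_leaf_quadkeys : Prop := ∀ (bm_raw : List Int), Dom_bitmask_to_leaf_quadkeys bm_raw → Pre_bitmask_to_leaf_quadkeys bm_raw → Spec_bitmask_to_leaf_quadkeys bm_raw (bitmask_to_leaf_quadkeys bm_raw)

-- ===== LEMMAS AND PROOFS =====

-- the nibble list, as the ports compute it (proof-side mirror of pvNibLen/pvNib)
def pvNibs (bm_raw : List Int) : List Int :=
  if (bm_raw.flatMap (fun (b : Int) => [b >>> (4 : Nat), PySem.Int.band b 15])).getLast? = some 0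
  then (bm_raw.flatMap (fun (b : Int) => [b >>> (4 : Nat), PySem.Int.band b 15])).dropLast
  else bm_raw.flatMap (fun (b : Int) => [b >>> (4 : Nat), PySem.Int.band b 15])

-- the children a nibble m hangs below parent p (BFS order)
def pvKids (m p : Int) : List Int :=
  ((List.range 4).filter (fun (i : Nat) => decide (PySem.Int.band m ((1 : Int) <<< (3 - i)) ≠ 0))).map
    (fun (i : Nat) => PySem.Int.bor (p <<< 2) (i : Int))

-- all nodes discovered while the pending queue q consumes the nibbles ms, in discovery order
def pvOut : List Int → List Int → List Int
  | [], _ => []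
  | _ :: _, [] => []
  | m :: ms, p :: q => pvKids m p ++ pvOut ms (q ++ pvKids m p)

-- 'queue never starves': before nibble k is consumed, more than k - t + … nodes are pending
def pvFeeds (ms : List Int) (t : Nat) : Prop :=
  ∀ k, k < ms.length → k < t + ((ms.take k).map pvCnt).sum

theorem pvOut_nil (q : List Int) : pvOut [] q = [] := rfl
theorem pvOut_cons (m : Int) (ms : List Int) (p : Int) (q : List Int) :
    pvOut (m :: ms) (p :: q) = pvKids m p ++ pvOut ms (q ++ pvKids m p) := rfl

-- bit k of m, as Python computes it: m & (1 << k) != 0  iff  (m >> k) is odd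
theorem pvBandPow (m : Int) (k : Nat) (hk : k < 4) :
    (PySem.Int.band m ((1 : Int) <<< k) ≠ 0) ↔ m / 2 ^ k % 2 = 1 := by
  have hpow : ((1 : Int) <<< k) = ((2 ^ k : Nat) : Int) := by interval_cases k <;> decide
  rw [hpow]
  unfold PySem.Int.band
  have hmask : (0 : Int) ≤ ((2 ^ k : Nat) : Int) := by positivity
  have htn : (((2 ^ k : Nat) : Int)).toNat = 2 ^ k := Int.toNat_natCast _
  by_cases hm : 0 ≤ m
  · rw [if_pos hm, if_pos hmask, htn, Nat.and_two_pow, Nat.testBit_eq_decide_div_mod_eq]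
    have hmm : (m.toNat : Int) = m := by omega
    by_cases hd : m.toNat / 2 ^ k % 2 = 1
    · simp only [hd, decide_true, Bool.toNat_true, one_mul]
      interval_cases k <;> (constructor <;> intro <;> omega)
    · simp only [hd, decide_false, Bool.toNat_false, zero_mul, Nat.cast_zero]
      interval_cases k <;> (constructor <;> intro <;> omega)
  · rw [if_neg hm, if_pos hmask, htn, Nat.and_comm, Nat.and_two_pow,
        Nat.testBit_eq_decide_div_mod_eq]
    have hmm : ((-m - 1).toNat : Int) = -m - 1 := by omega
    by_cases hd : (-m - 1).toNat / 2 ^ k % 2 = 1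
    · simp only [hd, decide_true, Bool.toNat_true, one_mul]
      interval_cases k <;> (constructor <;> intro <;> omega)
    · simp only [hd, decide_false, Bool.toNat_false, zero_mul]
      interval_cases k <;> (constructor <;> intro <;> omega)

theorem pvKids_length (m p : Int) : (pvKids m p).length = pvCnt m := by
  have h8 := pvBandPow m 3 (by omega)
  have h4 := pvBandPow m 2 (by omega)
  have h2 := pvBandPow m 1 (by omega)
  have h1 := pvBandPow m 0 (by omega)
  norm_num at h8 h4 h2 h1
  simp only [pvKids, pvCnt, List.length_map]
  rw [show List.range 4 = [0, 1, 2, 3] from rfl]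
  by_cases d8 : m / 8 % 2 = 1 <;> by_cases d4 : m / 4 % 2 = 1 <;>
    by_cases d2 : m / 2 % 2 = 1 <;> by_cases d1 : m % 2 = 1 <;>
      simp [List.filter_cons, List.filter_nil, List.countP_cons, List.countP_nil,
        h8, h4, h2, h1, d8, d4, d2, d1]

theorem pvFeeds_pos {m : Int} {ms : List Int} {t : Nat} (h : pvFeeds (m :: ms) t) : 0 < t := by
  simpa using h 0 (by simp)

theorem pvFeeds_cons {m : Int} {ms : List Int} {t : Nat} (h : pvFeeds (m :: ms) t) :
    pvFeeds ms (t - 1 + pvCnt m) := by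
  intro k hk
  have h0 : 0 < t := pvFeeds_pos h
  have := h (k + 1) (by simpa using hk)
  simp only [List.take_succ_cons, List.map_cons, List.sum_cons] at this
  omega

theorem pvFoldPair (P : Nat → Prop) [DecidablePred P] (f : Nat → Int) :
    ∀ (l : List Nat) (a b : List Int),
      l.foldl (fun (s : List Int × List Int) (i : Nat) =>
          if P i then (s.1 ++ [f i], s.2 ++ [f i]) else s) (a, b)
        = (a ++ (l.filter (fun i => decide (P i))).map f,
           b ++ (l.filter (fun i => decide (P i))).map f) := by
  intro l
  induction l with
  | nil => simp
  | cons i l ih =>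
    intro a b
    by_cases h : P i <;> simp [List.foldl_cons, List.filter_cons, h, ih]

theorem pvFoldSingle (P : Nat → Prop) [DecidablePred P] (f : Nat → Int) :
    ∀ (l : List Nat) (ns : List Int),
      l.foldl (fun (ns : List Int) (i : Nat) => if P i then ns ++ [f i] else ns) ns
        = ns ++ (l.filter (fun i => decide (P i))).map f := by
  intro l
  induction l with
  | nil => simp
  | cons i l ih =>
    intro ns
    by_cases h : P i <;> simp [List.foldl_cons, List.filter_cons, h, ih]

theorem pvBitsA_eq (m p : Int) (a b : List Int) :
    pvBitsA m p (a, b) = (a ++ pvKids m p, b ++ pvKids m p) := by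
  rw [pvBitsA, pvKids]
  exact pvFoldPair (fun i => PySem.Int.band m ((1 : Int) <<< (3 - i)) ≠ 0)
    (fun i => PySem.Int.bor (p <<< 2) (i : Int)) (List.range 4) a b

-- B tests bits with 8 >> i, which on 0 ≤ i < 4 is the same single-bit mask as 1 << (3 - i)
theorem pvBitsB_eq (m p : Int) (ns : List Int) :
    (List.range 4).foldl (fun (ns : List Int) (i : Nat) =>
        if PySem.Int.band m ((8 : Int) >>> i) ≠ 0 then
          ns ++ [PySem.Int.bor (p <<< 2) (i : Int)]
        else ns) ns = ns ++ pvKids m p := by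
  rw [pvKids,
    pvFoldSingle (fun i => PySem.Int.band m ((8 : Int) >>> i) ≠ 0)
      (fun i => PySem.Int.bor (p <<< 2) (i : Int)) (List.range 4) ns]
  have hfil : (List.range 4).filter
        (fun (i : Nat) => decide (PySem.Int.band m ((8 : Int) >>> i) ≠ 0))
      = (List.range 4).filter
        (fun (i : Nat) => decide (PySem.Int.band m ((1 : Int) <<< (3 - i)) ≠ 0)) := by
    apply List.filter_congr
    intro i hi
    simp only [List.mem_range] at hi
    interval_cases i <;> rfl
  rw [hfil]

theorem pvOuterA_stop (nibs : List Int) (fuel : Nat) (q : List Int) (idx : Nat) (all : List Int)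
    (h : nibs.length ≤ idx) : pvOuterA nibs fuel q idx all = all := by
  cases fuel with
  | zero => rfl
  | succ f => simp [pvOuterA, show ¬ idx < nibs.length by omega]

theorem pvOuterA_eq (nibs : List Int) :
    ∀ fuel (q : List Int) (idx : Nat) (all : List Int),
      pvFeeds (nibs.drop idx) q.length → nibs.length ≤ idx + fuel →
      pvOuterA nibs fuel q idx all = all ++ pvOut (nibs.drop idx) q := by
  intro fuel
  induction fuel with
  | zero =>
    intro q idx all _ hlen
    have hd : nibs.drop idx = [] := by simp [List.drop_eq_nil_iff]; omega
    simp [pvOuterA, hd, pvOut]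
  | succ fuel ih =>
    -- the inner for-loop, same fuel for the tail call
    have inner : ∀ (q : List Int) (idx : Nat) (all nq : List Int),
        pvFeeds (nibs.drop idx) (q.length + nq.length) →
        nibs.length ≤ idx + fuel + q.length →
        (let r := pvInnerA nibs q idx all nq
         pvOuterA nibs fuel r.2.2 r.1 r.2.1) = all ++ pvOut (nibs.drop idx) (q ++ nq) := by
      intro q
      induction q with
      | nil =>
        intro idx all nq hf hlen
        simpa [pvInnerA] using ih nq idx all (by simpa using hf) (by simpa using hlen)
      | cons p rest ihq =>
        intro idx all nq hf hlen
        by_cases hidx : nibs.length ≤ idx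
        · have hd : nibs.drop idx = [] := by simp [List.drop_eq_nil_iff]; omega
          simp [pvInnerA, hidx, pvOuterA_stop nibs fuel nq idx all hidx, hd, pvOut_nil]
        · push_neg at hidx
          have hd : nibs.drop idx = nibs[idx] :: nibs.drop (idx + 1) :=
            List.drop_eq_getElem_cons hidx
          have hget : PySem.List.pyGetD nibs (idx : Int) 0 = nibs[idx] := by
            rw [PySem.List.pyGetD_natCast]; simp [List.getD, hidx]
          have hf' : pvFeeds (nibs.drop (idx + 1))
              (rest.length + (nq ++ pvKids nibs[idx] p).length) := by
            rw [hd] at hf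
            have := pvFeeds_cons hf
            have hlen2 : rest.length + (nq ++ pvKids nibs[idx] p).length
                = (p :: rest).length + nq.length - 1 + pvCnt nibs[idx] := by
              simp [pvKids_length]
              omega
            rwa [hlen2]
          have step : pvInnerA nibs (p :: rest) idx all nq
              = pvInnerA nibs rest (idx + 1) (all ++ pvKids nibs[idx] p)
                  (nq ++ pvKids nibs[idx] p) := by
            simp only [pvInnerA, if_neg (by omega : ¬ nibs.length ≤ idx), hget, pvBitsA_eq]
          rw [step, ihq (idx + 1) (all ++ pvKids nibs[idx] p) (nq ++ pvKids nibs[idx] p) hf'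
                (by simp at hlen ⊢; omega)]
          rw [hd, List.cons_append, pvOut_cons]
          simp [List.append_assoc]
    intro q idx all hf hlen
    by_cases hidx : nibs.length ≤ idx
    · have hd : nibs.drop idx = [] := by simp [List.drop_eq_nil_iff]; omega
      simp [pvOuterA_stop nibs (fuel + 1) q idx all hidx, hd, pvOut_nil]
    · push_neg at hidx
      have hq : 0 < q.length := by
        have := hf 0 (by simpa using hidx)
        simpa using this
      have := inner q idx all [] (by simpa using hf) (by omega)
      simpa [pvOuterA, hidx] using this

-- B's flat loop: if nodes = visited ++ pending and the next index is |visited|, then the loop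
-- appends exactly the nodes pvOut discovers
theorem pvFoldB_eq (ms : List Int) : ∀ (vis pen : List Int), pvFeeds ms pen.length →
    (PySem.List.enumerate ms ((vis.length : Int))).foldl pvStepB (vis ++ pen)
      = (vis ++ pen) ++ pvOut ms pen := by
  induction ms with
  | nil => simp [pvOut_nil]
  | cons m ms ih =>
    intro vis pen hf
    cases pen with
    | nil => exact absurd (pvFeeds_pos hf) (by simp)
    | cons p pen =>
      have hget : PySem.List.pyGetD (vis ++ p :: pen) ((vis.length : Int)) 0 = p := by
        rw [PySem.List.pyGetD_natCast]
        simp [List.getD]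
      have hstep : pvStepB (vis ++ p :: pen) (((vis.length : Int)), m)
          = (vis ++ [p]) ++ (pen ++ pvKids m p) := by
        rw [pvStepB]
        simp only [hget, pvBitsB_eq]
        simp [List.append_assoc]
      have hf' : pvFeeds ms ((pen ++ pvKids m p).length) := by
        have := pvFeeds_cons hf
        have : pvFeeds ms ((p :: pen).length - 1 + pvCnt m) := this
        simpa [pvKids_length] using this
      have hrec := ih (vis ++ [p]) (pen ++ pvKids m p) hf'
      rw [PySem.List.enumerate_cons, List.foldl_cons, hstep]
      rw [show ((vis.length : Int) + 1) = (((vis ++ [p]).length : Nat) : Int) by simp] at *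
      rw [hrec]
      rw [pvOut_cons]
      simp [List.append_assoc]

-- the nibble preamble of both ports computes pvNibs
theorem pvNibs_eq (bm : List Int) :
    (if (bm.foldl (fun (acc : List Int) (b : Int) => acc ++ [b >>> (4 : Nat), PySem.Int.band b 15]) []).getLast? = some 0
     then (bm.foldl (fun (acc : List Int) (b : Int) => acc ++ [b >>> (4 : Nat), PySem.Int.band b 15]) []).dropLast
     else bm.foldl (fun (acc : List Int) (b : Int) => acc ++ [b >>> (4 : Nat), PySem.Int.band b 15]) [])
    = pvNibs bm := by
  have h : bm.foldl (fun (acc : List Int) (b : Int) => acc ++ [b >>> (4 : Nat), PySem.Int.band b 15]) []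
      = bm.flatMap (fun (b : Int) => [b >>> (4 : Nat), PySem.Int.band b 15]) := by
    simpa using PySem.List.foldl_append_eq_flatMap
      (g := fun (b : Int) => [b >>> (4 : Nat), PySem.Int.band b 15]) (l := bm)
  rw [h, pvNibs]

theorem pvShift4 (b : Int) : b >>> (4 : Nat) = b / 16 := by
  rw [Int.shiftRight_eq_div_pow]; norm_num

theorem pvBand15 (b : Int) : PySem.Int.band b 15 = b % 16 := by
  unfold PySem.Int.band
  by_cases hb : 0 ≤ b
  · rw [if_pos hb, if_pos (by norm_num)]
    have h : b.toNat &&& (15 : Int).toNat = b.toNat % 16 := by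
      simpa using Nat.and_two_pow_sub_one_eq_mod b.toNat 4
    rw [h]; omega
  · rw [if_neg hb, if_pos (by norm_num)]
    have h : (15 : Int).toNat &&& (-b - 1).toNat = (-b - 1).toNat % 16 := by
      rw [Nat.and_comm]
      simpa using Nat.and_two_pow_sub_one_eq_mod (-b - 1).toNat 4
    rw [h]; omega

theorem pvN0_length (bm : List Int) :
    (bm.flatMap (fun (b : Int) => [b >>> (4 : Nat), PySem.Int.band b 15])).length
      = 2 * bm.length := by
  induction bm with
  | nil => simp
  | cons b bm ih => simp [ih]; omega

theorem pvN0_getLast? : ∀ {bm : List Int} {b : Int}, bm.getLast? = some b →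
    (bm.flatMap (fun (b : Int) => [b >>> (4 : Nat), PySem.Int.band b 15])).getLast?
      = some (PySem.Int.band b 15)
  | [], b, h => by simp at h
  | [x], b, h => by
      simp at h
      simp [h]
  | x :: y :: ys, b, h => by
      rw [List.getLast?_cons_cons] at h
      rw [List.flatMap_cons, List.getLast?_append]
      rw [pvN0_getLast? h]
      simp

theorem pvFlatGet? (bm : List Int) : ∀ (k : Nat),
    (bm.flatMap (fun (b : Int) => [b >>> (4 : Nat), PySem.Int.band b 15]))[k]?
      = (bm[k / 2]?).map (fun (b : Int) => if k % 2 = 0 then b >>> (4 : Nat) else PySem.Int.band b 15) := by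
  induction bm with
  | nil => intro k; simp
  | cons b bm ih =>
    intro k
    match k with
    | 0 => simp
    | 1 => simp
    | (k + 2) =>
      rw [show ((k + 2) / 2) = k / 2 + 1 by omega, show ((k + 2) % 2) = k % 2 by omega]
      simpa using ih k

theorem pvNibs_length (bm : List Int) : (pvNibs bm).length = pvNibLen bm := by
  rcases hbm : bm.getLast? with _ | b
  · have he : bm = [] := by simpa using hbm
    subst he; simp [pvNibs, pvNibLen]
  · have hlast := pvN0_getLast? hbm
    rw [pvNibs, pvNibLen, hbm]
    by_cases hz : b % 16 = 0
    · rw [if_pos (by rw [hlast, pvBand15, hz]), if_pos (by simpa using hz)]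
      simp [pvN0_length]
      omega
    · rw [if_neg (by rw [hlast, pvBand15]; simpa using hz),
        if_neg (by simpa using hz), pvN0_length]

theorem pvNibs_getD (bm : List Int) {k : Nat}
    (hk : k < pvNibLen bm) : (pvNibs bm).getD k 0 = pvNib bm k := by
  have hk2 : k < 2 * bm.length := by
    rw [pvNibLen] at hk
    split at hk <;> omega
  have hhalf : k / 2 < bm.length := by omega
  have hget : (pvNibs bm)[k]?
      = (bm.flatMap (fun (b : Int) => [b >>> (4 : Nat), PySem.Int.band b 15]))[k]? := by
    rw [pvNibs]
    split
    · rename_i hpop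
      -- popped branch: the last byte ends in a zero nibble, so pvNibLen = 2*|bm| - 1
      have hklt : k
          < (bm.flatMap (fun (b : Int) => [b >>> (4 : Nat), PySem.Int.band b 15])).length - 1 := by
        rw [pvN0_length]
        rcases hbm : bm.getLast? with _ | b
        · have he : bm = [] := by simpa using hbm
          subst he; simp [pvNibLen] at hk
        · have hlast := pvN0_getLast? hbm
          rw [hlast] at hpop
          have hz : b % 16 = 0 := by
            have := Option.some_injective _ hpop
            rwa [pvBand15] at this
          rw [pvNibLen, hbm, Option.getD_some, if_pos hz] at hk
          omega
      rw [List.dropLast_eq_take, List.getElem?_take, if_pos hklt]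
    · rfl
  rw [List.getD_eq_getElem?_getD, hget, pvFlatGet?]
  have hs : bm[k / 2]? = some (bm[k / 2]) := List.getElem?_eq_getElem hhalf
  rw [hs, pvNib]
  by_cases hpar : k % 2 = 0
  · simp [hpar, pvShift4, hs]
  · simp [hpar, pvBand15, hs]

theorem pvTakeSum (bm : List Int) :
    ∀ k, k ≤ pvNibLen bm →
      (((pvNibs bm).take k).map pvCnt).sum = ∑ j ∈ Finset.range k, pvCnt (pvNib bm j) := by
  intro k
  induction k with
  | zero => simp
  | succ k ih =>
    intro hk
    have hk' : k < pvNibLen bm := by omega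
    have hklen : k < (pvNibs bm).length := by rw [pvNibs_length]; exact hk'
    have hsome : (pvNibs bm)[k]? = some (pvNib bm k) := by
      rw [List.getElem?_eq_getElem hklen]
      have h2 := pvNibs_getD bm hk'
      rw [List.getD_eq_getElem?_getD, List.getElem?_eq_getElem hklen, Option.getD_some] at h2
      exact congrArg some h2
    rw [List.take_succ, hsome, Finset.sum_range_succ, ← ih (by omega)]
    simp

theorem pvPre_feeds {bm : List Int} (hpre : Pre_bitmask_to_leaf_quadkeys bm) :
    pvFeeds (pvNibs bm) 1 := by
  intro k hk
  rw [pvNibs_length] at hk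
  rw [pvTakeSum bm k (le_of_lt hk)]
  exact hpre k hk

-- both ports, reduced to the same closed description under Pre_
theorem pvA_eq (bm : List Int) (hb : Pre_bitmask_to_leaf_quadkeys bm) :
    bitmask_to_leaf_quadkeys bm
      = PySem.List.slice (3 :: pvOut (pvNibs bm) [3])
          (some (-(((pvNibs bm).map (fun n => (PySem.Int.bitCount n : Int))).sum
                    - (pvNibs bm).length + 1))) none := by
  rw [bitmask_to_leaf_quadkeys]
  simp only [pvNibs_eq bm]
  have hfeeds' : pvFeeds (pvNibs bm) 1 := pvPre_feeds hb
  have houter := pvOuterA_eq (pvNibs bm) ((pvNibs bm).length + 1) [3] 0 [3]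
    (by simpa using hfeeds') (by omega)
  simp only [List.drop_zero] at houter
  rw [houter]
  rfl

theorem pvB_eq (bm : List Int) (hb : Pre_bitmask_to_leaf_quadkeys bm) :
    bitmask_to_leaf_quadkeys_alt bm
      = PySem.List.slice (3 :: pvOut (pvNibs bm) [3])
          (some (-(((pvNibs bm).map (fun n => (PySem.Int.bitCount n : Int))).sum
                    - (pvNibs bm).length + 1))) none := by
  rw [bitmask_to_leaf_quadkeys_alt]
  simp only [pvNibs_eq bm]
  have hfeeds' : pvFeeds (pvNibs bm) 1 := pvPre_feeds hb
  have hfold := pvFoldB_eq (pvNibs bm) [] [3] (by simpa using hfeeds')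
  simp only [List.nil_append, List.length_nil, Int.natCast_zero] at hfold
  rw [hfold]
  rfl

-- ===== VERDICT (by name: the statement is the Claim_ definition above) =====
theorem bitmask_to_leaf_quadkeys_spec : Claim_equal_bitmask_to_leaf_quadkeys := by
  intro bm _hdom hpre
  rw [Spec_bitmask_to_leaf_quadkeys, pvA_eq bm hpre, pvB_eq bm hpre]
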